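-- pv_equiv track=rewrite | github.com/qqaazz800624/LeetCode_TopInterview150 | easy/ibm_assessment.py | getWho
-- ===== SOURCE A (Python) =====
-- def getWho(s):
--     # Write your code here
--     # Check the number of strings constraint
--     if not 1 <= len(s) <= 100:
--         raise ValueError("The number of strings must be between 1 and 100.")
--
--     vowels = set('aeiou')
--     results = []
--
--     for code in s:
--         if not 1 <= len(code) <= 10**5:
--             raise ValueError("The length of each string must be between 1 and 100000.")
--
--         if not code.isalpha() or not code.islower():
--             raise ValueError("All strings must consist of lowercase English letters only.")
--
--         vowel_count = 0
--         for char in code: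
--             if char in vowels:
--                 vowel_count += 1
--
--         if vowel_count % 2 == 0:
--             results.append("Chris")
--         else:
--             results.append("Alex")
--
--     return results
-- ===== SOURCE B (Python) =====
-- def getWho(s):
--     # Validate everything up front (same checks, same order, same errors as the spec),
--     # then compute all verdicts in one comprehension: per string, the parity of the
--     # total vowel occurrences obtained by five str.count scans (one per vowel).
--     if not 1 <= len(s) <= 100:
--         raise ValueError("The number of strings must be between 1 and 100.")
--     for code in s:
--         if not 1 <= len(code) <= 10**5:
--             raise ValueError("The length of each string must be between 1 and 100000.")
--         if not code.isalpha() or not code.islower():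
--             raise ValueError("All strings must consist of lowercase English letters only.")
--     return ["Chris" if sum(code.count(v) for v in "aeiou") % 2 == 0 else "Alex"
--             for code in s]
-- ===== Notes on version B (the rewrite author's own statement) =====
-- stated objective: idiomatic
-- what changed: A fuses validation, a per-character set-membership counting loop and result accumulation into one loop; B validates all strings in a separate up-front pass and then produces every verdict in a single list comprehension whose vowel total comes from five str.count scans (one per vowel) instead of a per-character membership loop.
import Mathlib
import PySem

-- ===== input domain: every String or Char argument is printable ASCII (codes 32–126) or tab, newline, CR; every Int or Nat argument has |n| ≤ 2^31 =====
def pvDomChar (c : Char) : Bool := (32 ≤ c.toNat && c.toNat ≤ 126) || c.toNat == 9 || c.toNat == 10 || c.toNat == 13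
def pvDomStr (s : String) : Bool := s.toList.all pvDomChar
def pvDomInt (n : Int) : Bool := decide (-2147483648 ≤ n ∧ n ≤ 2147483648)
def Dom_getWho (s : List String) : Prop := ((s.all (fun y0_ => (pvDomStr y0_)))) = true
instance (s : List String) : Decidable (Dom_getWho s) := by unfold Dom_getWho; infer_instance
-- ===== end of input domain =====

-- B validates all strings in a separate up-front pass, then computes every verdict in one
-- comprehension counting vowels via five str.count scans (vs A's fused per-char membership loop) — idiomatic, same cost.


-- ===== PORT A =====
-- hand port of str.islower(): at least one cased char and no uppercase cased char; exact on ASCII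
def pyStrIslower (code : String) : Bool :=
  code.toList.any (fun c => PySem.Chars.islower c || PySem.Chars.isupper c) &&
  code.toList.all (fun c => !PySem.Chars.isupper c)

def pvVowelsA : PySem.Set Char := PySem.Set.ofList "aeiou".toList

-- the for-loop over the codes; `none` models the two `raise` statements (excluded by Pre_)
def getWhoLoopA (results : List String) : List String → Option (List String)
  | [] => some results
  | code :: rest =>
      if ¬ (1 ≤ PySem.Str.len code ∧ PySem.Str.len code ≤ 100000) then none
      else if ¬ (PySem.Str.strIsalpha code = true) ∨ ¬ (pyStrIslower code = true) then none
      else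
        let vc : Int := code.toList.foldl
          (fun acc ch => if pvVowelsA.contains ch then acc + 1 else acc) 0
        let r := if PySem.Int.mod vc 2 == 0 then "Chris" else "Alex"
        getWhoLoopA (results ++ [r]) rest

def getWho (s : List String) : List String :=
  if ¬ (1 ≤ PySem.List.len s ∧ PySem.List.len s ≤ 100) then []  -- raise; excluded by Pre_
  else (getWhoLoopA [] s).getD []

-- ===== PORT B =====
-- the up-front validation pass; `false` models the two `raise` statements
def getWhoCheckB : List String → Bool
  | [] => true
  | code :: rest =>
      if ¬ (1 ≤ PySem.Str.len code ∧ PySem.Str.len code ≤ 100000) then false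
      else if ¬ (PySem.Str.strIsalpha code = true) ∨ ¬ (pyStrIslower code = true) then false
      else getWhoCheckB rest

def getWho_alt (s : List String) : List String :=
  if ¬ (1 ≤ PySem.List.len s ∧ PySem.List.len s ≤ 100) then []  -- raise; excluded by Pre_
  else if getWhoCheckB s then
    s.map (fun code =>
      if (("aeiou".toList.map (fun v => PySem.Str.count code (String.ofList [v]))).sum) % 2 = 0
      then "Chris" else "Alex")
  else []  -- raise; excluded by Pre_

-- ===== PRECONDITION & SPEC =====
-- Pre_ holds exactly when A raises no ValueError: 1–100 strings, each 1–100000 chars,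
-- alphabetic and lowercase.
def Pre_getWho (s : List String) : Prop :=
  1 ≤ s.length ∧ s.length ≤ 100 ∧
  ∀ code ∈ s, 1 ≤ code.toList.length ∧ code.toList.length ≤ 100000 ∧
    PySem.Str.strIsalpha code = true ∧ pyStrIslower code = true
instance (s : List String) : Decidable (Pre_getWho s) := by unfold Pre_getWho; infer_instance

def pvWitness_getWho : List String := ["ab"]

def Spec_getWho (s : List String) (out : List String) : Prop := out = getWho_alt s
instance (s : List String) (out : List String) : Decidable (Spec_getWho s out) := by unfold Spec_getWho; infer_instance

-- ===== CLAIM (what is proved, stated in full; the proofs are below) =====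
def Claim_equal_getWho : Prop := ∀ (s : List String), Dom_getWho s → Pre_getWho s → Spec_getWho s (getWho s)

-- ===== LEMMAS AND PROOFS =====

-- str.count with a one-character needle is the character count
theorem countGo_single (c : Char) : ∀ (cs : List Char) (fuel acc : Nat), cs.length ≤ fuel →
    PySem.Chars.count.go [c] fuel cs acc = acc + cs.count c := by
  intro cs
  induction cs with
  | nil => intro fuel acc _; cases fuel <;> simp [PySem.Chars.count.go]
  | cons h t ih =>
      intro fuel acc hle
      cases fuel with
      | zero => simp at hle
      | succ n =>
        simp only [PySem.Chars.count.go, List.isPrefixOf, List.count_cons]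
        by_cases hc : c = h
        · subst hc
          simp
          rw [ih n (acc + 1) (by simpa using hle)]
          omega
        · have h1 : (c == h) = false := by simp [hc]
          have h2 : (h == c) = false := by simp; exact fun e => hc e.symm
          simp [h1, h2]
          rw [ih n acc (by simpa using hle)]

theorem count_single (cs : List Char) (c : Char) :
    PySem.Chars.count cs [c] = cs.count c := by
  simp [PySem.Chars.count]
  simpa using countGo_single c cs cs.length 0 le_rfl

-- the five per-vowel counts sum to the vowel-membership count
theorem sum_five (cs : List Char) :
    cs.count 'a' + (cs.count 'e' + (cs.count 'i' + (cs.count 'o' + (cs.count 'u' + 0)))) =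
    cs.countP (fun ch => pvVowelsA.contains ch) := by
  induction cs with
  | nil => simp
  | cons h t ih =>
      have hv : (pvVowelsA : List Char) = ['a','e','i','o','u'] := by decide
      simp only [List.count_cons, List.countP_cons, ← ih]
      by_cases hA : h = 'a' <;> by_cases hE : h = 'e' <;> by_cases hI : h = 'i'
        <;> by_cases hO : h = 'o' <;> by_cases hU : h = 'u' <;>
        simp_all [PySem.Set.contains] <;> omega

-- main per-code lemma: A's verdict equals B's verdict
theorem toList_mk_single (v : Char) : (String.ofList [v]).toList = [v] := by simp

theorem code_verdict (code : String) :
    (if PySem.Int.mod (code.toList.foldl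
        (fun acc ch => if pvVowelsA.contains ch then acc + 1 else acc) 0) 2 == 0
     then "Chris" else "Alex") =
    (if (("aeiou".toList.map (fun v => PySem.Str.count code (String.ofList [v]))).sum) % 2 = 0
     then "Chris" else "Alex") := by
  have hA := PySem.List.foldl_if_add_one (fun ch => pvVowelsA.contains ch) code.toList (0 : Int)
  have hs : "aeiou".toList = ['a', 'e', 'i', 'o', 'u'] := by decide
  have hB : (("aeiou".toList.map (fun v => PySem.Str.count code (String.ofList [v]))).sum)
      = code.toList.countP (fun ch => pvVowelsA.contains ch) := by
    simp only [hs, List.map_cons, List.map_nil, List.sum_cons, List.sum_nil,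
      PySem.Str.count_eq, toList_mk_single, count_single]
    exact sum_five code.toList
  rw [hA, hB, zero_add]
  have hm : PySem.Int.mod ((code.toList.countP (fun ch => pvVowelsA.contains ch) : Nat) : Int) 2
      = ((code.toList.countP (fun ch => pvVowelsA.contains ch) % 2 : Nat) : Int) := by
    exact_mod_cast PySem.Int.mod_natCast (code.toList.countP (fun ch => pvVowelsA.contains ch)) 2
  rw [hm]
  rcases Nat.mod_two_eq_zero_or_one (code.toList.countP (fun ch => pvVowelsA.contains ch)) with h | h <;>
    rw [h] <;> simp

theorem loop_eq (s : List String) (results : List String)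
    (h : ∀ code ∈ s, 1 ≤ code.toList.length ∧ code.toList.length ≤ 100000 ∧
      PySem.Str.strIsalpha code = true ∧ pyStrIslower code = true) :
    (getWhoLoopA results s).getD [] =
      results ++ s.map (fun code =>
        if (("aeiou".toList.map (fun v => PySem.Str.count code (String.ofList [v]))).sum) % 2 = 0
        then "Chris" else "Alex") := by
  induction s generalizing results with
  | nil => simp [getWhoLoopA]
  | cons code rest ih =>
      obtain ⟨hl1, hl2, ha, hlow⟩ := h code (by simp)
      have hlen : PySem.Str.len code = (code.toList.length : Int) := by
        simp [PySem.Str.len_eq]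
      rw [getWhoLoopA]
      rw [if_neg (by rw [hlen]; exact not_not_intro ⟨by omega, by omega⟩)]
      rw [if_neg (not_or.mpr ⟨not_not_intro ha, not_not_intro hlow⟩)]
      rw [ih _ (fun c hc => h c (by simp [hc]))]
      simp only [List.map_cons]
      rw [code_verdict]
      simp

theorem check_true (s : List String)
    (h : ∀ code ∈ s, 1 ≤ code.toList.length ∧ code.toList.length ≤ 100000 ∧
      PySem.Str.strIsalpha code = true ∧ pyStrIslower code = true) :
    getWhoCheckB s = true := by
  induction s with
  | nil => rfl
  | cons code rest ih =>
      obtain ⟨hl1, hl2, ha, hlow⟩ := h code (by simp)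
      have hlen : PySem.Str.len code = (code.toList.length : Int) := by
        simp [PySem.Str.len_eq]
      rw [getWhoCheckB]
      rw [if_neg (by rw [hlen]; exact not_not_intro ⟨by omega, by omega⟩)]
      rw [if_neg (not_or.mpr ⟨not_not_intro ha, not_not_intro hlow⟩)]
      exact ih (fun c hc => h c (by simp [hc]))

-- ===== VERDICT (by name: the statement is the Claim_ definition above) =====
theorem getWho_spec : Claim_equal_getWho := by
  intro s _ hpre
  obtain ⟨h1, h2, h3⟩ := hpre
  have hguard : ¬ ¬ (1 ≤ PySem.List.len s ∧ PySem.List.len s ≤ 100) := by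
    simp [PySem.List.len]; omega
  unfold Spec_getWho getWho getWho_alt
  rw [if_neg hguard, if_neg hguard, if_pos (check_true s h3), loop_eq s [] h3]
  simp
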